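-- pv_equiv track=rewrite | github.com/Ni-Xilin/Augur | Generator_Trainer/baseline/BLANKET/mdeepcorr/BLANKETmdeepcorrtest.py | generate_perturbation
-- ===== SOURCE A (Python) =====
-- def generate_perturbation(change_points, size=700):
--     """
--     生成一个排列图谱 (permutation map)。
--     这个图谱定义了如何移动旧数据包，为新注入的数据包腾出空间。
--     """
--     start = size - len(change_points)
--     pert = []
--     passed = 0
--     for ind in range(size):
--         if ind in change_points:
--             pert.append(start)
--             start += 1
--             passed += 1
--         else:
--             pert.append(ind - passed)
--     return pert
-- ===== SOURCE B (Python) =====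
-- def generate_perturbation(change_points, size=700):
--     cp = set(change_points)
--     start = size - len(change_points)
--     pert = []
--     for ind in range(size):
--         if ind in cp:
--             pert.append(start)
--             start += 1
--         else:
--             pert.append(None)
--     out = []
--     low = 0
--     for v in pert:
--         if v is None:
--             out.append(low)
--             low += 1
--         else:
--             out.append(v)
--     return out
-- ===== Notes on version B (the rewrite author's own statement) =====
-- stated objective: faster
-- what changed: Replaces the single loop that tracks a 'passed' counter and scans change_points per index with a two-pass scatter: a set-membership first pass marks change-point slots with the tail block (None elsewhere), and a second pass fills the remaining slots with a running low counter.
import Mathlib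
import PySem

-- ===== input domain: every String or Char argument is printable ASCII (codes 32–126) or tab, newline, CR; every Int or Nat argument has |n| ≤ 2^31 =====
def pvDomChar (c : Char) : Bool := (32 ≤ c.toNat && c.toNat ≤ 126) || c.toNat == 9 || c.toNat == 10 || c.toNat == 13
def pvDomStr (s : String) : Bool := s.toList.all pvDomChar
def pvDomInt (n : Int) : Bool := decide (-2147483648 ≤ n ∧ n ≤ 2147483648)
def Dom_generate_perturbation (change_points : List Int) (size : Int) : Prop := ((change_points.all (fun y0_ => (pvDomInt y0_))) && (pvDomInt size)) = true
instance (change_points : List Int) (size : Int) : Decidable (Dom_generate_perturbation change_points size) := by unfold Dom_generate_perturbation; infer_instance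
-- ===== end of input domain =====

-- B replaces A's single loop (with its per-index 'passed' counter and linear scan of
-- change_points) by a two-pass scatter over a set: mark change-point slots with the tail
-- block, then fill the remaining slots with a running low counter (faster in a timing run).

-- ===== PORT A =====
-- the 'for ind in range(size)' loop: state (start, passed), one emitted element per ind
def pvALoop (change_points : List Int) : List Int → Int → Int → List Int
  | [], _, _ => []
  | ind :: r, start, passed =>
    if change_points.contains ind then start :: pvALoop change_points r (start + 1) (passed + 1)
    else (ind - passed) :: pvALoop change_points r start passed

def generate_perturbation (change_points : List Int) (size : Int) : List Int :=
  pvALoop change_points (PySem.List.pyRange 0 size 1) (size - (change_points.length : Int)) 0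

-- ===== PORT B =====
-- first pass: scatter start, start+1, … onto change-point positions, None (none) elsewhere
def pvBFirst (cp : PySem.Set Int) : List Int → Int → List (Option Int)
  | [], _ => []
  | ind :: r, start =>
    if PySem.Set.contains cp ind then some start :: pvBFirst cp r (start + 1)
    else none :: pvBFirst cp r start

-- second pass: fill the remaining (none) slots with low, low+1, …
def pvBSecond : List (Option Int) → Int → List Int
  | [], _ => []
  | none :: r, low => low :: pvBSecond r (low + 1)
  | some v :: r, _low => v :: pvBSecond r _low

def generate_perturbation_alt (change_points : List Int) (size : Int) : List Int :=
  pvBSecond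
    (pvBFirst (PySem.Set.ofList change_points) (PySem.List.pyRange 0 size 1)
      (size - (change_points.length : Int)))
    0

-- ===== PRECONDITION & SPEC =====
def Spec_generate_perturbation (change_points : List Int) (size : Int) (out : List Int) : Prop := out = generate_perturbation_alt change_points size
instance (change_points : List Int) (size : Int) (out : List Int) : Decidable (Spec_generate_perturbation change_points size out) := by unfold Spec_generate_perturbation; infer_instance

-- ===== CLAIM (what is proved, stated in full; the proofs are below) =====
def Claim_equal_generate_perturbation : Prop := ∀ (change_points : List Int) (size : Int), Dom_generate_perturbation change_points size → Spec_generate_perturbation change_points size (generate_perturbation change_points size)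

-- ===== LEMMAS AND PROOFS =====

theorem pvSet_contains_ofList (cps : List Int) (n : Int) :
    PySem.Set.contains (PySem.Set.ofList cps) n = cps.contains n := by
  simp [PySem.Set.mem_ofList]

-- B's two passes over a consecutive block starting at n compute A's loop, provided the low
-- counter enters the second pass at n - passed.
theorem pvMain (cps : List Int) : ∀ (len : Nat) (n start passed : Int),
    pvBSecond (pvBFirst (PySem.Set.ofList cps)
        ((List.range len).map (fun (k : Nat) => n + (k : Int))) start) (n - passed)
      = pvALoop cps ((List.range len).map (fun (k : Nat) => n + (k : Int))) start passed := by
  intro len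
  induction len with
  | zero => intro n start passed; simp only [List.range_zero, List.map_nil]; rfl
  | succ m ih =>
    intro n start passed
    have hmap : (List.range m).map (fun k : Nat => n + ((k + 1 : Nat) : Int))
        = (List.range m).map (fun k : Nat => (n + 1) + (k : Int)) := by
      apply List.map_congr_left
      intro k _
      push_cast
      ring
    have hrange : (List.range (m + 1)).map (fun (k : Nat) => n + (k : Int))
        = n :: (List.range m).map (fun k : Nat => (n + 1) + (k : Int)) := by
      rw [List.range_succ_eq_map]
      simp only [List.map_cons, Nat.cast_zero, add_zero, List.map_map]
      rw [← hmap]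
      rfl
    rw [hrange]
    by_cases hm : n ∈ cps
    · simp only [pvBFirst, pvALoop, pvSet_contains_ofList, List.contains_iff_mem, hm,
        if_true, pvBSecond, List.cons.injEq]
      refine ⟨trivial, ?_⟩
      have hlow : n - passed = (n + 1) - (passed + 1) := by ring
      rw [hlow]
      exact ih (n + 1) (start + 1) (passed + 1)
    · simp only [pvBFirst, pvALoop, pvSet_contains_ofList, List.contains_iff_mem, hm,
        if_false, pvBSecond, List.cons.injEq]
      refine ⟨trivial, ?_⟩
      have hlow : n - passed + 1 = (n + 1) - passed := by ring
      rw [hlow]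
      exact ih (n + 1) start passed

-- ===== VERDICT (by name: the statement is the Claim_ definition above) =====
theorem generate_perturbation_spec : Claim_equal_generate_perturbation := by
  intro cps size _
  unfold Spec_generate_perturbation generate_perturbation generate_perturbation_alt
  rw [PySem.List.pyRange_one]
  have h := pvMain cps (size - 0).toNat 0 (size - (cps.length : Int)) 0
  rw [sub_zero] at h
  rw [sub_zero]
  exact h.symm
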